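-- pv_equiv track=rewrite | github.com/nomelancholy/problem_solving | 프로그래머스/lv0/120864. 숨어있는 숫자의 덧셈 （2）/숨어있는 숫자의 덧셈 （2）.py | solution
-- ===== SOURCE A (Python) =====
-- def solution(my_string):
--     answer = 0
--     number_str = ''
--
--     for c in my_string:
--         if c.isdigit():
--             number_str += c
--         else:
--             if number_str:
--                 answer += int(number_str)
--                 number_str = ''
--
--     if number_str:
--         answer += int(number_str)
--
--     return answer
-- ===== SOURCE B (Python) =====
-- def solution(my_string):
--     masked = ''.join(c if c.isdigit() else ' ' for c in my_string)
--     return sum(map(int, masked.split()))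
-- ===== Notes on version B (the rewrite author's own statement) =====
-- stated objective: idiomatic
-- what changed: Two staged passes instead of A's single accumulator-flush loop: first mask every non-digit character to a space building a new string, then whitespace-split that string into the digit runs and sum their int values.
import Mathlib
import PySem

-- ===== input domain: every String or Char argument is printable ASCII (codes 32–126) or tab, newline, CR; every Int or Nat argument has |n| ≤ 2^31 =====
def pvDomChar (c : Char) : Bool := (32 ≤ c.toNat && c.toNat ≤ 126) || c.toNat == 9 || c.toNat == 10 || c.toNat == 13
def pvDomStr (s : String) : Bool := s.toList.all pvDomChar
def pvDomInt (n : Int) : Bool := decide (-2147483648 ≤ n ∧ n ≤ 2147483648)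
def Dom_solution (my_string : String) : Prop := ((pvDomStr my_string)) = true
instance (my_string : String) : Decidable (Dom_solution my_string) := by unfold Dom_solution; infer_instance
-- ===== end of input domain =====

-- B replaces A's single accumulator-flush loop with two staged passes: mask non-digits to
-- spaces into a new string, then whitespace-split it and sum the int values (idiomatic; same cost).


-- ===== PORT A =====
-- int(number_str): by A's guards number_str is a nonempty run of ASCII digits, so
-- int() never raises; the .getD 0 default is unreachable.
def pvInt (cs : List Char) : Int := (PySem.Int.ofChars? cs).getD 0

-- the for-loop over my_string with state (answer, number_str), then the final flush
def solLoop : List Char → Int → List Char → Int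
  | [], answer, number_str =>
      if number_str ≠ [] then answer + pvInt number_str else answer
  | c :: rest, answer, number_str =>
      if PySem.Chars.isdigit c then
        solLoop rest answer (number_str ++ [c])
      else
        if number_str ≠ [] then solLoop rest (answer + pvInt number_str) []
        else solLoop rest answer number_str

def solution (my_string : String) : Int := solLoop my_string.toList 0 []

-- ===== PORT B =====
-- c if c.isdigit() else ' '
def pvMask (c : Char) : Char := if PySem.Chars.isdigit c then c else ' '

-- int(w); the words produced by .split() on the masked string are nonempty digit runs,
-- so int() never raises and the .getD 0 default is unreachable
def pvIntS (w : String) : Int := (PySem.Int.ofStr? w).getD 0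

-- masked = ''.join(...); return sum(map(int, masked.split()))
def solution_alt (my_string : String) : Int :=
  ((PySem.Str.split₀ (String.ofList (my_string.toList.map pvMask))).map pvIntS).foldl (· + ·) 0

-- ===== PRECONDITION & SPEC =====
def Spec_solution (my_string : String) (out : Int) : Prop := out = solution_alt my_string
instance (my_string : String) (out : Int) : Decidable (Spec_solution my_string out) := by unfold Spec_solution; infer_instance

-- ===== CLAIM (what is proved, stated in full; the proofs are below) =====
def Claim_equal_solution : Prop := ∀ (my_string : String), Dom_solution my_string → Spec_solution my_string (solution my_string)

-- ===== LEMMAS AND PROOFS =====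

-- sum of the int values of a list of words
def sumW (ws : List (List Char)) : Int := (ws.map pvInt).foldl (· + ·) 0

theorem foldl_add_init (l : List Int) (a : Int) :
    l.foldl (· + ·) a = a + l.foldl (· + ·) 0 := by
  induction l generalizing a with
  | nil => simp
  | cons x xs ih =>
      simp only [List.foldl]
      rw [ih (a + x), ih (0 + x)]
      ring

theorem sumW_cons (w : List Char) (ws : List (List Char)) :
    sumW (w :: ws) = pvInt w + sumW ws := by
  simp only [sumW, List.map, List.foldl, zero_add]
  rw [foldl_add_init]

-- a digit character is not whitespace
theorem isdigit_not_isspace (c : Char) (h : PySem.Chars.isdigit c = true) :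
    PySem.Chars.isspace c = false := by
  simp only [PySem.Chars.isdigit, Bool.and_eq_true, decide_eq_true_eq, Char.le_def,
    UInt32.le_iff_toNat_le, show ('0':Char).val.toNat = 48 from rfl,
    show ('9':Char).val.toNat = 57 from rfl] at h
  simp only [PySem.Chars.isspace, Char.toNat]
  simp only [decide_eq_false_iff_not, Bool.or_eq_false_iff, Bool.and_eq_false_iff]
  omega

-- split₀.go's accumulator holds already-finished words, reversed
theorem split₀_go_acc (s : List Char) (cur : List Char) (acc : List (List Char)) :
    PySem.Chars.split₀.go s cur acc = acc.reverse ++ PySem.Chars.split₀.go s cur [] := by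
  induction s generalizing cur acc with
  | nil =>
      simp only [PySem.Chars.split₀.go]
      by_cases h : cur.isEmpty <;> simp [h]
  | cons c rest ih =>
      simp only [PySem.Chars.split₀.go]
      by_cases hs : PySem.Chars.isspace c
      · by_cases h : cur.isEmpty
        · simp only [hs, h, if_true]
          exact ih [] acc
        · simp only [hs, h, if_true]
          rw [ih [] (cur.reverse :: acc), ih [] [cur.reverse]]
          simp
      · simp only [hs]
        exact ih (c :: cur) acc

-- main loop invariant: A's flush loop from state (answer, num) computes answer plus the
-- sum of the words that split₀.go extracts from the masked rest, starting from cur = num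
theorem solLoop_eq (cs : List Char) (answer : Int) (num : List Char)
    (hd : ∀ x ∈ num, PySem.Chars.isdigit x = true) :
    solLoop cs answer num =
      answer + sumW (PySem.Chars.split₀.go (cs.map pvMask) num.reverse []) := by
  induction cs generalizing answer num with
  | nil =>
      by_cases hne : num = []
      · simp [hne, solLoop, PySem.Chars.split₀.go, sumW]
      · rw [solLoop, if_pos hne]
        simp only [List.map_nil, PySem.Chars.split₀.go]
        rw [if_neg (by simp [List.isEmpty_iff, hne])]
        simp [sumW]
  | cons c rest ih =>
      by_cases hc : PySem.Chars.isdigit c = true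
      · have hmask : pvMask c = c := by simp [pvMask, hc]
        have hnum : ∀ x ∈ num ++ [c], PySem.Chars.isdigit x = true := by
          intro x hx
          rcases List.mem_append.1 hx with h | h
          · exact hd x h
          · simp at h; subst h; exact hc
        rw [solLoop, if_pos hc, ih answer (num ++ [c]) hnum]
        simp only [List.map, hmask, PySem.Chars.split₀.go, isdigit_not_isspace c hc,
          Bool.false_eq_true, if_false, List.reverse_append, List.reverse_singleton,
          List.singleton_append]
      · have hc' : PySem.Chars.isdigit c = false := by
          cases h : PySem.Chars.isdigit c
          · rfl
          · exact absurd h hc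
        have hmask : pvMask c = ' ' := by simp [pvMask, hc']
        have hsp : PySem.Chars.isspace ' ' = true := by decide
        rw [solLoop, if_neg (by simp [hc'])]
        by_cases hne : num = []
        · rw [if_neg (by simp [hne]), ih answer num hd, hne]
          simp [List.map, hmask, PySem.Chars.split₀.go, hsp]
        · rw [if_pos hne, ih (answer + pvInt num) [] (by simp)]
          simp only [List.map, hmask, PySem.Chars.split₀.go, hsp, if_true,
            List.isEmpty_iff, List.reverse_eq_nil_iff]
          rw [if_neg hne, split₀_go_acc _ [] [num.reverse.reverse]]
          simp [sumW_cons, add_assoc]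

-- B's value, rewritten through the String ↔ List Char bridge
theorem solution_alt_eq (s : String) :
    solution_alt s = sumW (PySem.Chars.split₀ (s.toList.map pvMask)) := by
  have hmap : (PySem.Str.split₀ (String.ofList (s.toList.map pvMask))).map pvIntS
      = ((PySem.Str.split₀ (String.ofList (s.toList.map pvMask))).map String.toList).map pvInt := by
    simp only [List.map_map]
    exact List.map_congr_left (fun w _ => by simp [pvIntS, pvInt, PySem.Int.ofStr?])
  rw [solution_alt, hmap, PySem.Str.split₀_map_toList]
  simp [sumW]

-- ===== VERDICT (by name: the statement is the Claim_ definition above) =====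
theorem solution_spec : Claim_equal_solution := by
  intro s _
  show solution s = solution_alt s
  rw [solution, solLoop_eq s.toList 0 [] (by simp), solution_alt_eq]
  simp [PySem.Chars.split₀]
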